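-- pv_equiv track=rewrite | github.com/Skantz/Puzzles | leetcode/number-of-valid-words-in-a-sentence.py | countValidWords
-- ===== SOURCE A (Python) =====
-- def countValidWords(sentence: str) -> int:
--     sentence = sentence.split(' ')
--     sentence = [e for e in sentence if e]
--     # 1
--     sentence = [e for e in sentence if not any(g.isdigit() for g in e)]
--     # 2
--     sentence = [e for e in sentence if e.count('-') < 2 and e[0] != '-' and e[-1] != '-'
--       and (e.count('-') < 1 or e[e.index('-') - 1].isalpha() and e[e.index('-') + 1].isalpha())]
--     # 3
--     sentence = [e for e in sentence if all(g.isalpha() or g.isdigit() or g == '-' for g in e[:-1])]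
--     return len(sentence)
-- ===== SOURCE B (Python) =====
-- def _is_valid(w):
--     hyphens = False
--     prev = None
--     for c in w:
--         if c.isdigit():
--             return False
--         if prev is not None and not (prev.isalpha() or prev == '-'):
--             return False
--         if c == '-':
--             if hyphens or prev is None or not prev.isalpha():
--                 return False
--             hyphens = True
--         elif prev == '-' and not c.isalpha():
--             return False
--         prev = c
--     return prev != '-'
--
--
-- def countValidWords(sentence: str) -> int:
--     count = 0
--     for w in sentence.split(' '):
--         if w and _is_valid(w):
--             count += 1
--     return count
-- ===== Notes on version B (the rewrite author's own statement) =====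
-- stated objective: alternative
-- what changed: Replaces A's four sequential list-comprehension filter passes (each rescanning every word with count/index/slice) by a single left-to-right state-machine scan per word that tracks the previous character and whether a hyphen was seen.
import Mathlib
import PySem

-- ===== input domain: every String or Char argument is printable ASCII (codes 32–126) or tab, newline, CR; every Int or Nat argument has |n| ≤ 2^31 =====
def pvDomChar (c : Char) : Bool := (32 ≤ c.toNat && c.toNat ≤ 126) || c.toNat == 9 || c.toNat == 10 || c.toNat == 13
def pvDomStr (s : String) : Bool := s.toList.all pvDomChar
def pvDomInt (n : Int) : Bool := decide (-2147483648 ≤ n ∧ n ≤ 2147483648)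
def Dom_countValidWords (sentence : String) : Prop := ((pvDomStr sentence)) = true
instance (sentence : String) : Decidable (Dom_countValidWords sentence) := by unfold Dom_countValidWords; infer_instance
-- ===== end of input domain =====

-- B replaces A's four sequential filter passes by one state-machine scan per word; same O(n) cost, objective: alternative.

-- ===== PORT A =====
-- stage 1: not any(g.isdigit() for g in e)
def aNoDigit (e : List Char) : Bool := !(e.any (fun g => PySem.Chars.isdigit g))
-- stage 2 predicate; e[0], e[-1], e[e.index('-') ± 1] are in range whenever Python evaluates them,
-- so pyGetD's default ' ' is never the decisive value (exact on nonempty words, the only ones reaching this stage)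
def aHyphen (e : List Char) : Bool :=
  decide (PySem.Chars.count e ['-'] < 2) &&
  !(PySem.List.pyGetD e 0 ' ' == '-') &&
  !(PySem.List.pyGetD e (-1) ' ' == '-') &&
  (decide (PySem.Chars.count e ['-'] < 1) ||
    (PySem.Chars.isalpha (PySem.List.pyGetD e (PySem.Chars.find e ['-'] - 1) ' ') &&
     PySem.Chars.isalpha (PySem.List.pyGetD e (PySem.Chars.find e ['-'] + 1) ' ')))
-- stage 3: all(g.isalpha() or g.isdigit() or g == '-' for g in e[:-1])
def aTail (e : List Char) : Bool :=
  (PySem.List.slice e none (some (-1))).all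
    (fun g => PySem.Chars.isalpha g || PySem.Chars.isdigit g || g == '-')

def countValidWords (sentence : String) : Int :=
  let s0 := PySem.Chars.splitOn sentence.toList [' ']
  let s1 := s0.filter (fun e => !e.isEmpty)
  let s2 := s1.filter (fun e => aNoDigit e)
  let s3 := s2.filter (fun e => aHyphen e)
  let s4 := s3.filter (fun e => aTail e)
  (s4.length : Int)

-- ===== PORT B =====
-- the per-word scan of Source B's _is_valid: prev = previously seen char, hyphens = a hyphen was consumed
def bGo : List Char → Option Char → Bool → Bool
  | [], prev, _ => !(prev == some '-')
  | c :: rest, prev, hyphens =>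
    if PySem.Chars.isdigit c then false
    else if prev.elim false (fun p => !(PySem.Chars.isalpha p || p == '-')) then false
    else if c == '-' then
      if hyphens || prev.elim true (fun p => !PySem.Chars.isalpha p) then false
      else bGo rest (some c) true
    else if (prev == some '-') && !PySem.Chars.isalpha c then false
    else bGo rest (some c) hyphens

def bValid (w : List Char) : Bool := bGo w none false

def countValidWords_alt (sentence : String) : Int :=
  (PySem.Chars.splitOn sentence.toList [' ']).foldl
    (fun count w => if !w.isEmpty && bValid w then count + 1 else count) (0 : Int)

-- ===== PRECONDITION & SPEC =====
def Spec_countValidWords (sentence : String) (out : Int) : Prop := out = countValidWords_alt sentence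
instance (sentence : String) (out : Int) : Decidable (Spec_countValidWords sentence out) := by unfold Spec_countValidWords; infer_instance

-- ===== CLAIM (what is proved, stated in full; the proofs are below) =====
def Claim_equal_countValidWords : Prop := ∀ (sentence : String), Dom_countValidWords sentence → Spec_countValidWords sentence (countValidWords sentence)

-- ===== LEMMAS AND PROOFS =====

-- closed form of bGo, and helper predicates (proof-side only)
def adjOk (l : List Char) : Bool :=
  (l.zip l.tail).all (fun ab =>
    (!(ab.2 == '-') || PySem.Chars.isalpha ab.1) && (!(ab.1 == '-') || PySem.Chars.isalpha ab.2))

def bClosed (p : Char) (hy : Bool) (w : List Char) : Bool :=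
  w.all (fun c => !PySem.Chars.isdigit c) &&
  (w.isEmpty || PySem.Chars.isalpha p || p == '-') &&
  (w.dropLast).all (fun c => PySem.Chars.isalpha c || c == '-') &&
  !(w.getLastD p == '-') &&
  adjOk (p :: w) &&
  (!hy || w.count '-' == 0) &&
  decide (w.count '-' ≤ 1)


theorem adjOk_cons₂ (p c : Char) (rest : List Char) :
    adjOk (p :: c :: rest) =
      (((!(c == '-') || PySem.Chars.isalpha p) && (!(p == '-') || PySem.Chars.isalpha c)) &&
        adjOk (c :: rest)) := by
  simp [adjOk]

theorem dropLast_cons_all (c : Char) (rest : List Char) (q : Char → Bool) :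
    ((c :: rest).dropLast).all q = ((rest.isEmpty || q c) && rest.dropLast.all q) := by
  cases rest <;> simp


theorem bGo_closed (w : List Char) : ∀ (p : Char) (hy : Bool),
    bGo w (some p) hy = bClosed p hy w := by
  induction w with
  | nil => intro p hy; simp [bGo, bClosed, adjOk]
  | cons c rest ih =>
    intro p hy
    have hpa : (p == '-') = true → PySem.Chars.isalpha p = false := by
      intro h; rw [beq_iff_eq] at h; subst h; decide
    have hca : (c == '-') = true → PySem.Chars.isalpha c = false := by
      intro h; rw [beq_iff_eq] at h; subst h; decide
    simp only [bGo, ih, bClosed, List.all_cons, List.isEmpty_cons, List.count_cons,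
      adjOk_cons₂, dropLast_cons_all, List.getLastD_cons, Option.elim]
    by_cases hn0 : rest.count '-' = 0
    · simp only [hn0]
      cases hc : (c == '-') <;>
        cases hp : (p == '-') <;> cases hap : PySem.Chars.isalpha p <;>
          cases hd : PySem.Chars.isdigit c <;> cases hy <;> cases hac : PySem.Chars.isalpha c <;>
          simp_all [Bool.and_assoc, Bool.and_comm, Bool.and_left_comm]
    · have h1 : (rest.count '-' == 0) = false := by simpa using hn0
      have hrne : rest = [] → False := by intro h; subst h; simp at hn0
      simp only [h1]
      cases hc : (c == '-') <;>
        cases hp : (p == '-') <;> cases hap : PySem.Chars.isalpha p <;>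
          cases hd : PySem.Chars.isdigit c <;> cases hy <;> cases hac : PySem.Chars.isalpha c <;>
          simp_all [Bool.and_assoc, Bool.and_comm, Bool.and_left_comm]


theorem count_go_singleton (c : Char) (l : List Char) : ∀ (fuel acc : ℕ), l.length ≤ fuel →
    PySem.Chars.count.go [c] fuel l acc = acc + l.count c := by
  induction l with
  | nil => intro fuel acc _; cases fuel <;> simp [PySem.Chars.count.go]
  | cons h t ih =>
    intro fuel acc hle
    cases fuel with
    | zero => simp at hle
    | succ n =>
      simp only [PySem.Chars.count.go]
      by_cases hc : h = c
      · subst hc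
        simp [List.isPrefixOf, ih n (acc+1) (by simpa using hle)]
        omega
      · simp [List.isPrefixOf, hc, Ne.symm hc, ih n acc (by simpa using hle)]

theorem count_singleton (l : List Char) (c : Char) : PySem.Chars.count l [c] = l.count c := by
  simp [PySem.Chars.count, count_go_singleton c l l.length 0 le_rfl]


theorem singleton_prefix_iff (l : List Char) (c : Char) : [c] <+: l ↔ l.head? = some c := by
  cases l with
  | nil => simp
  | cons h t => simp [List.cons_prefix_iff, eq_comm]


theorem adjOk_iff (l : List Char) : adjOk l = true ↔
    ∀ i (h : i + 1 < l.length),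
      (l[i + 1] = '-' → PySem.Chars.isalpha l[i] = true) ∧
      (l[i] = '-' → PySem.Chars.isalpha l[i + 1] = true) := by
  unfold adjOk
  rw [List.all_eq_true]
  constructor
  · intro h i hi
    have hz : i < (l.zip l.tail).length := by
      simp [List.length_zip, List.length_tail]; omega
    have := h (l.zip l.tail)[i] (List.getElem_mem hz)
    rw [List.getElem_zip] at this
    have hti : i < l.tail.length := by simp [List.length_tail]; omega
    have ht : l.tail[i]'hti = l[i+1] := by
      rw [List.getElem_tail]
    rw [ht] at this
    simp only [Bool.and_eq_true, Bool.or_eq_true, Bool.not_eq_true', beq_eq_false_iff_ne, ne_eq] at this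
    constructor
    · intro he; rcases this.1 with h1 | h1
      · exact absurd he h1
      · exact h1
    · intro he; rcases this.2 with h1 | h1
      · exact absurd he h1
      · exact h1
  · intro h ab hab
    rw [List.mem_iff_getElem] at hab
    obtain ⟨i, hi, rfl⟩ := hab
    have hlen : i + 1 < l.length := by
      simp [List.length_zip, List.length_tail] at hi; omega
    rw [List.getElem_zip, List.getElem_tail]
    have := h i hlen
    simp only [Bool.and_eq_true, Bool.or_eq_true, Bool.not_eq_true', beq_eq_false_iff_ne, ne_eq]
    constructor
    · by_cases he : l[i+1] = '-'
      · exact Or.inr (this.1 he)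
      · exact Or.inl he
    · by_cases he : l[i] = '-'
      · exact Or.inr (this.2 he)
      · exact Or.inl he


theorem find_singleton_spec (e : List Char) (hmem : '-' ∈ e) :
    ∃ j : ℕ, PySem.Chars.find e ['-'] = (j : Int) ∧ e[j]? = some '-' ∧
      ∀ i < j, e[i]? ≠ some '-' := by
  have hinf : ['-'] <:+: e := (List.singleton_infix_iff '-' e).mpr hmem
  have h0 : 0 ≤ PySem.Chars.find e ['-'] := (PySem.Chars.find_nonneg_iff e ['-']).mpr hinf
  obtain ⟨hpre, hmin⟩ := PySem.Chars.find_spec h0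
  refine ⟨(PySem.Chars.find e ['-']).toNat, (Int.toNat_of_nonneg h0).symm, ?_, ?_⟩
  · rw [← List.head?_drop]
    exact (singleton_prefix_iff _ _).mp hpre
  · intro i hi hcontra
    exact hmin i hi ((singleton_prefix_iff _ _).mpr (by rw [List.head?_drop]; exact hcontra))


theorem count_le_one_unique (e : List Char) (h : e.count '-' ≤ 1) (k j : ℕ)
    (hk : k < e.length) (hj : j < e.length)
    (h1 : e[k] = '-') (h2 : e[j] = '-') : k = j := by
  by_contra hne
  have : List.Duplicate '-' e := by
    rcases Nat.lt_or_ge k j with hlt | hge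
    · exact List.duplicate_iff_exists_distinct_get.mpr ⟨⟨k, hk⟩, ⟨j, hj⟩, hlt, by simp [h1], by simp [h2]⟩
    · have hlt : j < k := by omega
      exact List.duplicate_iff_exists_distinct_get.mpr ⟨⟨j, hj⟩, ⟨k, hk⟩, hlt, by simp [h2], by simp [h1]⟩
  have := List.duplicate_iff_two_le_count.mp this
  omega


-- the hyphen-neighbour conjunct of A equals adjOk, under the other stage-2 conjuncts
theorem lastD_eq_getElem (l : List Char) (h : 0 < l.length) (d : Char) :
    l.getLastD d = l[l.length - 1] := by
  rw [List.getLastD_eq_getLast?, List.getLast?_eq_getElem?, List.getElem?_eq_getElem (by omega)]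
  rfl

theorem hyphen_adj (e : List Char) (hne : 0 < e.length)
    (hc : e.head? ≠ some '-')
    (hlast : e.getLastD ' ' ≠ '-')
    (hn : e.count '-' ≤ 1) :
    (decide (e.count '-' < 1) ||
      (PySem.Chars.isalpha (PySem.List.pyGetD e (PySem.Chars.find e ['-'] - 1) ' ') &&
       PySem.Chars.isalpha (PySem.List.pyGetD e (PySem.Chars.find e ['-'] + 1) ' ')))
      = adjOk e := by
  by_cases hn0 : e.count '-' = 0
  · have hnm : '-' ∉ e := by
      intro hm; exact absurd (List.count_pos_iff.mpr hm) (by omega)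
    have hadj : adjOk e = true := by
      rw [adjOk_iff]
      intro i hi
      constructor
      · intro hcontra; exact absurd (hcontra ▸ List.getElem_mem hi) hnm
      · intro hcontra
        exact absurd (hcontra ▸ List.getElem_mem (by omega : i < e.length)) hnm
    simp [hadj, hn0]
  · have hmem : '-' ∈ e := List.count_pos_iff.mp (by omega)
    obtain ⟨j, hfj, hj?, hmin⟩ := find_singleton_spec e hmem
    have hjlen : j < e.length := (List.getElem?_eq_some_iff.mp hj?).1
    have hje : e[j] = '-' := (List.getElem?_eq_some_iff.mp hj?).2
    have hj1 : 1 ≤ j := by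
      rcases Nat.eq_zero_or_pos j with h0 | h; swap; · exact h
      exfalso; apply hc
      rw [List.head?_eq_getElem?, ← h0]
      exact hj?
    have hlast' : e.getLastD ' ' = e[e.length - 1] := lastD_eq_getElem e hne ' '
    have hjlast : j + 1 < e.length := by
      rcases Nat.lt_or_ge (j+1) e.length with h | h; · exact h
      exfalso; apply hlast
      have hj : j = e.length - 1 := by omega
      have hgc : e[e.length - 1]'(by omega) = e[j]'hjlen := getElem_congr rfl hj.symm (by omega)
      rw [hlast', hgc]; exact hje
    have huniq : ∀ k (hk : k < e.length), e[k] = '-' → k = j := fun k hk hkk =>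
      count_le_one_unique e hn k j hk hjlen hkk hje
    have hget1 : PySem.List.pyGetD e (PySem.Chars.find e ['-'] - 1) ' ' = e[j-1]'(by omega) := by
      rw [hfj]
      have hcast : (j : Int) - 1 = ((j - 1 : ℕ) : Int) := by omega
      rw [hcast, PySem.List.pyGetD_natCast, List.getD_eq_getElem?_getD,
        List.getElem?_eq_getElem (by omega)]
      rfl
    have hget2 : PySem.List.pyGetD e (PySem.Chars.find e ['-'] + 1) ' ' = e[j+1]'hjlast := by
      rw [hfj]
      have hcast : (j : Int) + 1 = ((j + 1 : ℕ) : Int) := by omega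
      rw [hcast, PySem.List.pyGetD_natCast, List.getD_eq_getElem?_getD,
        List.getElem?_eq_getElem hjlast]
      rfl
    rw [hget1, hget2]
    have hn0' : decide (e.count '-' < 1) = false := by simp; omega
    rw [hn0']
    rw [Bool.false_or, Bool.eq_iff_iff, Bool.and_eq_true, adjOk_iff]
    constructor
    · rintro ⟨ha1, ha2⟩ i hi
      constructor
      · intro hh
        have hij' := huniq (i+1) hi hh
        have hij : i = j - 1 := by omega
        subst hij; exact ha1
      · intro hh
        have hij := huniq i (by omega) hh
        subst hij; exact ha2
    · intro hadj
      constructor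
      · have hp := (hadj (j-1) (by omega)).1
        simp only [Nat.sub_add_cancel hj1] at hp
        exact hp hje
      · exact (hadj j hjlast).2 hje


theorem word_equiv (e : List Char) :
    (!e.isEmpty && (aNoDigit e && (aHyphen e && aTail e))) = (!e.isEmpty && bValid e) := by
  cases e with
  | nil => rfl
  | cons c rest =>
    have hb : bValid (c :: rest) =
        (!PySem.Chars.isdigit c && (!(c == '-') && bClosed c false rest)) := by
      unfold bValid
      simp only [bGo, Option.elim]
      cases hd : PySem.Chars.isdigit c
      · cases hc : (c == '-') <;> simp [bGo_closed]
      · simp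
    have hlastA : PySem.List.pyGetD (c :: rest) (-1) ' ' = rest.getLastD c := by
      rw [PySem.List.pyGetD_neg_one _ ' ' (by simp)]
      exact List.getLast_eq_getLastD _
    rw [hb, Bool.eq_iff_iff]
    simp only [aNoDigit, aHyphen, aTail, count_singleton, PySem.List.slice_to_neg_one,
      PySem.List.pyGetD_zero_cons, List.isEmpty_cons, Bool.not_false, Bool.true_and, hlastA]
    by_cases hc : c = '-'
    · simp [hc, bClosed]
    have hcb : (c == '-') = false := by simp [hc]
    have hcnt : (c :: rest).count '-' = rest.count '-' := by simp [hc]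
    simp only [hcb, Bool.not_false, Bool.true_and, Bool.and_eq_true, decide_eq_true_eq,
      List.all_eq_true, Bool.or_eq_true, Bool.not_eq_true', beq_eq_false_iff_ne]
    have hmemdl : ∀ x ∈ rest.dropLast, x ∈ (c :: rest).dropLast := by
      by_cases hre : rest = []
      · simp [hre]
      · intro x hx; rw [List.dropLast_cons_of_ne_nil hre]; exact List.mem_cons_of_mem c hx
    have hcdl : rest ≠ [] → c ∈ (c :: rest).dropLast := by
      intro hre; rw [List.dropLast_cons_of_ne_nil hre]; exact List.mem_cons_self
    constructor
    · rintro ⟨hnd, ⟨⟨⟨hn2, -⟩, hlst⟩, hnb⟩, htl⟩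
      have hnd' : ∀ g ∈ (c :: rest), PySem.Chars.isdigit g = false := by
        simpa using List.any_eq_false.mp hnd
      have hdc : PySem.Chars.isdigit c = false := hnd' c List.mem_cons_self
      refine ⟨hdc, ?_⟩
      have hn1 : (c :: rest).count '-' ≤ 1 := by omega
      have hadj : adjOk (c :: rest) = true := by
        rw [← hyphen_adj (c :: rest) (by simp) (by simp [hc]) (by rw [List.getLastD_cons]; exact hlst) hn1]
        rcases hnb with h0 | ⟨h1, h2⟩
        · simp [h0]
        · simp [h1, h2]
      rw [bClosed]
      simp only [Bool.and_eq_true, List.all_eq_true, Bool.or_eq_true, Bool.not_eq_true',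
        beq_eq_false_iff_ne, decide_eq_true_eq, hadj, Bool.not_false, and_assoc, and_true]
      refine ⟨fun g hg => by simpa using hnd' g (List.mem_cons_of_mem c hg), ?_, ?_, hlst, Or.inl trivial, by omega⟩
      · by_cases hre : rest = []
        · exact Or.inl (Or.inl (by simp [hre]))
        · rcases htl c (hcdl hre) with (ha | hd) | hh
          · exact Or.inl (Or.inr ha)
          · rw [hdc] at hd; cases hd
          · exact Or.inr hh
      · intro x hx
        rcases htl x (hmemdl x hx) with (ha | hd) | hh
        · left; exact ha
        · have hxd := hnd' x (List.mem_cons_of_mem c (List.dropLast_sublist rest |>.mem hx))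
          rw [hxd] at hd; cases hd
        · right; exact hh
    · rintro ⟨hdc, hcl⟩
      rw [bClosed] at hcl
      simp only [Bool.and_eq_true, List.all_eq_true, Bool.or_eq_true, Bool.not_eq_true',
        beq_eq_false_iff_ne, decide_eq_true_eq, and_assoc] at hcl
      obtain ⟨hrd, hint, hdl, hlst, hadj, -, hn1⟩ := hcl
      have hnd : ((c :: rest).any fun g => PySem.Chars.isdigit g) = false :=
        List.any_eq_false.mpr (by
          intro x hx
          rcases List.mem_cons.mp hx with rfl | hx'
          · simp [hdc]
          · simp [hrd x hx'])
      have hn1' : (c :: rest).count '-' ≤ 1 := by omega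
      refine ⟨hnd, ⟨⟨⟨by omega, trivial⟩, hlst⟩, ?_⟩, ?_⟩
      · have hdisj := hyphen_adj (c :: rest) (by simp) (by simp [hc]) (by rw [List.getLastD_cons]; exact hlst) hn1'
        rw [hadj] at hdisj
        rcases (Bool.or_eq_true _ _).mp hdisj with h0 | h12
        · left; simpa using h0
        · right; simpa using (Bool.and_eq_true _ _).mp h12
      · intro x hx
        by_cases hre : rest = []
        · rw [hre] at hx; simp at hx
        · rw [List.dropLast_cons_of_ne_nil hre] at hx
          rcases List.mem_cons.mp hx with rfl | hx'
          · rcases hint with (he | ha) | hh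
            · rw [List.isEmpty_iff] at he; exact absurd he hre
            · exact Or.inl (Or.inl ha)
            · exact Or.inr (by simp [hh])
          · rcases hdl x hx' with ha | hh
            · exact Or.inl (Or.inl ha)
            · exact Or.inr (by simp [hh])

-- ===== VERDICT (by name: the statement is the Claim_ definition above) =====
theorem countValidWords_spec : Claim_equal_countValidWords := by
  intro sentence _
  unfold Spec_countValidWords countValidWords countValidWords_alt
  rw [PySem.List.foldl_count_if (fun w => !w.isEmpty && bValid w)
    (PySem.Chars.splitOn sentence.toList [' ']) 0]
  simp only [List.filter_filter, ← List.countP_eq_length_filter, zero_add]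
  congr 1
  exact List.countP_congr (fun e _ => by
    have := word_equiv e
    constructor <;> intro h <;> simp_all)
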